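-- pv_equiv track=rewrite | github.com/Amr-YA/Face-Detection-Recognition | face_rec_code/video_face_rec.py | split_show_time
-- ===== SOURCE A (Python) =====
-- def split_show_time(named_show, exit_threshold_ms = 1500):
--     named_split_shows = {}
--     for name, arr in named_show.items():
--         temp = [arr[0]]
--         splits = []
--
--         for i, v in enumerate(arr):
--             if v == temp[-1]:
--                 pass
--             elif (v - temp[-1] <= exit_threshold_ms):
--                 temp.append(v)
--             elif not(i == len(arr)):
--                 splits.append(temp)
--                 temp = [v]
--             else:
--                 splits.append(temp)
--
--         # append last temp after for exit
--         splits.append(temp)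
--
--         # keep start and end only, append dummy value if an array has single frame
--         for i, times in enumerate(splits):
--             if len(times) == 1:
--                 times.append(times[-1])
--             splits[i] = [times[0], times[-1]]
--
--         named_split_shows[name] = splits
--
--     named_split_shows = refine_results(named_split_shows)
--     return named_split_shows
--
-- def refine_results(named_split_shows):
--     for name, arrs in list(named_split_shows.items()):
--         if (len(arrs) == 1) and (arrs[0][0] == arrs[0][-1]):
--             named_split_shows.pop(name)
--
--     return named_split_shows
-- ===== SOURCE B (Python) =====
-- def split_show_time(named_show, exit_threshold_ms=1500):
--     # Recursive divide-at-first-gap: find the first gap index, emit the leading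
--     # segment as [start, end], recurse on the rest of the array.
--     def first_break(arr):
--         for i in range(1, len(arr)):
--             if arr[i] != arr[i - 1] and arr[i] - arr[i - 1] > exit_threshold_ms:
--                 return i
--         return None
--
--     def segments(arr):
--         i = first_break(arr)
--         if i is None:
--             return [[arr[0], arr[-1]]]
--         return [[arr[0], arr[i - 1]]] + segments(arr[i:])
--
--     out = {}
--     for name, arr in named_show.items():
--         segs = segments(arr)
--         if not (len(segs) == 1 and segs[0][0] == segs[0][-1]):
--             out[name] = segs
--     return out
-- ===== Notes on version B (the rewrite author's own statement) =====
-- stated objective: alternative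
-- what changed: A iterates once over each array growing a temp list of every timestamp, flushes it into splits at each gap, then in a second pass reduces each list to [first,last] with a dummy append for singletons and finally pops degenerate entries; B instead recursively divides each array: it finds the first gap index, emits [arr[0], arr[i-1]] directly, and recurses on the sliced tail, filtering degenerate names as the dict is built.
-- outside the precondition, e.g. on split_show_time({'x': []}, 1500): A raises IndexError, B raises IndexError
import Mathlib
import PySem

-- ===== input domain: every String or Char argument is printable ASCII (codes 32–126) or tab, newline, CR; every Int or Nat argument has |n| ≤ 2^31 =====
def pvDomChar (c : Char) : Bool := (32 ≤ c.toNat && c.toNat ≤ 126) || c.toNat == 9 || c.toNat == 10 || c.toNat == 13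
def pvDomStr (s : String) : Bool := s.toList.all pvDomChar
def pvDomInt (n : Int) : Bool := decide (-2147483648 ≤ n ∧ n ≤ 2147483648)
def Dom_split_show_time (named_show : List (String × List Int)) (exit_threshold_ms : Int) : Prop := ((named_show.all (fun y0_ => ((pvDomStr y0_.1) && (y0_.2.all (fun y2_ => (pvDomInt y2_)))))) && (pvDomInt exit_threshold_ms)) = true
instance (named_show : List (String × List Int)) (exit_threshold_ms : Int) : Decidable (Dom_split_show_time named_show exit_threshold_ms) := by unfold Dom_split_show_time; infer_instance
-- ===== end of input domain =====

-- B replaces A's grow-a-temp-list-then-reduce-and-dummy-append loop by a recursive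
-- divide-at-first-gap: find the first gap index, emit [arr[0], arr[i-1]], recurse on the
-- sliced tail (objective: alternative). Python dicts are association lists here
-- (distinct keys, insertion order).

-- ===== PORT A =====
-- squeeze step of A's second loop: dummy-append for singletons, then [times[0], times[-1]]
def pvSqueeze (times : List Int) : List Int :=
  let times2 := if times.length = 1 then times ++ [(PySem.List.pyGet? times (-1)).getD 0] else times
  [(PySem.List.pyGet? times2 0).getD 0, (PySem.List.pyGet? times2 (-1)).getD 0]

-- A's main loop over enumerate(arr) with state (temp, splits); temp[-1] as pyGet? (in-range
-- whenever reached, since temp is never empty on any path A takes; getD 0 is never the default)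
def pvALoop (thr narr : Int) : List (Int × Int) → List Int × List (List Int) → List Int × List (List Int)
  | [], st => st
  | (i, v) :: rest, (temp, splits) =>
    let last := (PySem.List.pyGet? temp (-1)).getD 0
    if v = last then pvALoop thr narr rest (temp, splits)
    else if v - last ≤ thr then pvALoop thr narr rest (temp ++ [v], splits)
    else if ¬ i = narr then pvALoop thr narr rest ([v], splits ++ [temp])
    else pvALoop thr narr rest (temp, splits ++ [temp])

-- per-array body of A (temp = [arr[0]]; arr[0] raises on an empty array — excluded by Pre_)
def pvASegments (thr : Int) (arr : List Int) : List (List Int) :=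
  let st := pvALoop thr (PySem.List.len arr) (PySem.List.enumerate arr)
              ([(PySem.List.pyGet? arr 0).getD 0], [])
  (st.2 ++ [st.1]).map pvSqueeze

-- refine_results' pop condition: len(arrs) == 1 and arrs[0][0] == arrs[0][-1]
def pvDropCondA (arrs : List (List Int)) : Bool :=
  arrs.length == 1 &&
    ((PySem.List.pyGet? ((PySem.List.pyGet? arrs 0).getD []) 0).getD 0
      == (PySem.List.pyGet? ((PySem.List.pyGet? arrs 0).getD []) (-1)).getD 0)

-- dict build (distinct keys ⇒ map) then refine_results (pop over a copy ⇒ filter)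
def split_show_time (named_show : List (String × List Int)) (exit_threshold_ms : Int) : List (String × List (List Int)) :=
  ((named_show.map (fun p => (p.1, pvASegments exit_threshold_ms p.2))).filter
    (fun p => ! pvDropCondA p.2))

-- ===== PORT B =====
-- gap test of B's first_break loop: arr[i] != arr[i-1] and arr[i] - arr[i-1] > thr
def pvBreakAt (thr : Int) (arr : List Int) (i : Int) : Bool :=
  decide ((PySem.List.pyGet? arr i).getD 0 ≠ (PySem.List.pyGet? arr (i - 1)).getD 0 ∧
          (PySem.List.pyGet? arr i).getD 0 - (PySem.List.pyGet? arr (i - 1)).getD 0 > thr)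

-- first_break(arr): 'for i in range(1, len(arr)): if gap: return i' — first match or None
def pvFirstBreak (thr : Int) (arr : List Int) : Option Int :=
  (PySem.List.pyRange 1 (PySem.List.len arr) 1).find? (pvBreakAt thr arr)

-- needed by pvSegsB's decreasing_by: a returned break index is a proper position ≥ 1
lemma pvFirstBreak_bounds (thr : Int) (arr : List Int) (i : Int)
    (h : pvFirstBreak thr arr = some i) : 1 ≤ i ∧ i < (arr.length : Int) := by
  have hmem := List.mem_of_find?_eq_some h
  rw [PySem.List.mem_pyRange_one] at hmem
  rw [PySem.List.len_eq] at hmem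
  exact hmem

-- segments(arr): no break → [[arr[0], arr[-1]]]; break at i → [arr[0], arr[i-1]] :: segments(arr[i:])
def pvSegsB (thr : Int) (arr : List Int) : List (List Int) :=
  match h : pvFirstBreak thr arr with
  | none => [[(PySem.List.pyGet? arr 0).getD 0, (PySem.List.pyGet? arr (-1)).getD 0]]
  | some i =>
    [(PySem.List.pyGet? arr 0).getD 0, (PySem.List.pyGet? arr (i - 1)).getD 0]
      :: pvSegsB thr (PySem.List.slice arr (some i) none)
termination_by arr.length
decreasing_by
  have hb := pvFirstBreak_bounds thr arr i h
  rw [PySem.List.slice_from arr (by omega : (0:Int) ≤ i)]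
  simp only [List.length_drop]
  omega

-- B's final filter: not (len(segs) == 1 and segs[0][0] == segs[0][-1])
def pvKeepCondB (segs : List (List Int)) : Bool :=
  ! (segs.length == 1 &&
      ((PySem.List.pyGet? ((PySem.List.pyGet? segs 0).getD []) 0).getD 0
        == (PySem.List.pyGet? ((PySem.List.pyGet? segs 0).getD []) (-1)).getD 0))

-- B's dict-building loop: out[name] = segs appends a fresh key (keys distinct under Pre_)
def split_show_time_alt (named_show : List (String × List Int)) (exit_threshold_ms : Int) : List (String × List (List Int)) :=
  named_show.foldl (fun out p =>
    let segs := pvSegsB exit_threshold_ms p.2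
    if pvKeepCondB segs then out ++ [(p.1, segs)] else out) []

-- ===== PRECONDITION & SPEC =====
-- Pre_ excludes inputs where some name maps to a zero-length timestamp list, on which A raises
-- IndexError at arr[0], and duplicate-keyed association lists, which cannot arise from a Python dict argument.
def Pre_split_show_time (named_show : List (String × List Int)) (exit_threshold_ms : Int) : Prop :=
  (∀ p ∈ named_show, p.2 ≠ []) ∧ (named_show.map Prod.fst).Nodup

instance (named_show : List (String × List Int)) (exit_threshold_ms : Int) : Decidable (Pre_split_show_time named_show exit_threshold_ms) := by unfold Pre_split_show_time; infer_instance

def pvWitness_split_show_time : (List (String × List Int)) × Int :=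
  ([("ann", [10, 20, 5000, 5100]), ("bob", [7])], 1500)

def Spec_split_show_time (named_show : List (String × List Int)) (exit_threshold_ms : Int) (out : List (String × List (List Int))) : Prop := out = split_show_time_alt named_show exit_threshold_ms
instance (named_show : List (String × List Int)) (exit_threshold_ms : Int) (out : List (String × List (List Int))) : Decidable (Spec_split_show_time named_show exit_threshold_ms out) := by unfold Spec_split_show_time; infer_instance

-- ===== CLAIM (what is proved, stated in full; the proofs are below) =====
def Claim_equal_split_show_time : Prop := ∀ (named_show : List (String × List Int)) (exit_threshold_ms : Int), Dom_split_show_time named_show exit_threshold_ms → Pre_split_show_time named_show exit_threshold_ms → Spec_split_show_time named_show exit_threshold_ms (split_show_time named_show exit_threshold_ms)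

-- ===== LEMMAS AND PROOFS =====

-- common specification: segment list of prev-value p, current-segment start s, remaining values
def pvSegs (thr : Int) : Int → Int → List Int → List (List Int)
  | p, s, [] => [[s, p]]
  | p, s, v :: rest =>
    if v ≠ p ∧ v - p > thr then [s, p] :: pvSegs thr v v rest else pvSegs thr v s rest

def pvUpdStart (s : Int) : List (List Int) → List (List Int)
  | [] => []
  | seg :: xs => (s :: seg.drop 1) :: xs

lemma pvSegs_upd (thr : Int) : ∀ (rest : List Int) (p s : Int),
    pvSegs thr p s rest = pvUpdStart s (pvSegs thr p p rest) := by
  intro rest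
  induction rest with
  | nil => intro p s; simp [pvSegs, pvUpdStart]
  | cons v r ih =>
    intro p s
    by_cases h : v ≠ p ∧ v - p > thr
    · simp [pvSegs, h, pvUpdStart]
    · simp only [pvSegs, if_neg h]
      rw [ih v s, ih v p]
      cases hs : pvSegs thr v v r with
      | nil => simp [pvUpdStart]
      | cons seg xs => simp [pvUpdStart]

-- ---- B side: Nat-level view of first_break ----
def pvGap (thr : Int) (arr : List Int) (k : Nat) : Bool :=
  decide (arr.getD (k + 1) 0 ≠ arr.getD k 0 ∧ arr.getD (k + 1) 0 - arr.getD k 0 > thr)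

def pvNatFB (thr : Int) (arr : List Int) : Option Nat :=
  (List.range (arr.length - 1)).find? (pvGap thr arr)

lemma pvFind?_congr {α : Type} (p q : α → Bool) : ∀ (l : List α),
    (∀ x ∈ l, p x = q x) → l.find? p = l.find? q := by
  intro l
  induction l with
  | nil => intro _; rfl
  | cons x xs ih =>
    intro h
    rw [List.find?_cons, List.find?_cons, h x List.mem_cons_self]
    cases hq : q x with
    | true => rfl
    | false => exact ih (fun y hy => h y (List.mem_cons_of_mem x hy))

lemma pvFirstBreak_eq_natFB (thr : Int) (arr : List Int) :
    pvFirstBreak thr arr = (pvNatFB thr arr).map (fun k : Nat => (k : Int) + 1) := by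
  unfold pvFirstBreak pvNatFB
  rw [PySem.List.len_eq, PySem.List.pyRange_one]
  rw [show ((arr.length : Int) - 1).toNat = arr.length - 1 from by omega]
  rw [List.find?_map]
  have hcongr : ∀ k ∈ List.range (arr.length - 1),
      (pvBreakAt thr arr ∘ fun k : Nat => 1 + (k : Int)) k = pvGap thr arr k := by
    intro k hk
    show pvBreakAt thr arr (1 + (k : Int)) = pvGap thr arr k
    unfold pvBreakAt pvGap
    rw [show (1 : Int) + (k : Int) = ((k + 1 : Nat) : Int) from by push_cast; ring]
    rw [show ((k + 1 : Nat) : Int) - 1 = ((k : Nat) : Int) from by push_cast; ring]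
    simp only [PySem.List.pyGet?_natCast]
    simp [List.getD_eq_getElem?_getD]
  rw [pvFind?_congr _ _ _ hcongr]
  rw [show (fun k : Nat => 1 + (k : Int)) = (fun k : Nat => (k : Int) + 1) from by
    funext k; ring]

lemma pvGap_cons_succ (thr a : Int) (l : List Int) (k : Nat) :
    pvGap thr (a :: l) (k + 1) = pvGap thr l k := by
  unfold pvGap
  simp

lemma pvNatFB_cons2 (thr a b : Int) (t : List Int) :
    pvNatFB thr (a :: b :: t) =
      if pvGap thr (a :: b :: t) 0 then some 0
      else (pvNatFB thr (b :: t)).map (· + 1) := by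
  unfold pvNatFB
  simp only [List.length_cons, Nat.add_sub_cancel]
  rw [List.range_succ_eq_map, List.find?_cons]
  by_cases hg : pvGap thr (a :: b :: t) 0 = true
  · rw [if_pos hg, hg]
  · rw [if_neg hg]
    rw [show pvGap thr (a :: b :: t) 0 = false from by simpa using hg]
    rw [List.find?_map]
    rw [pvFind?_congr _ _ _ (fun k _ => by
      show pvGap thr (a :: b :: t) (Nat.succ k) = pvGap thr (b :: t) k
      exact pvGap_cons_succ thr a (b :: t) k)]

lemma pvSegsB_singleton (thr a : Int) : pvSegsB thr [a] = [[a, a]] := by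
  rw [pvSegsB]
  rw [show pvFirstBreak thr [a] = none from rfl]
  rfl

lemma pvSegsB_cons2 (thr a b : Int) (t : List Int) :
    pvSegsB thr (a :: b :: t) =
      if pvGap thr (a :: b :: t) 0 then [a, a] :: pvSegsB thr (b :: t)
      else pvUpdStart a (pvSegsB thr (b :: t)) := by
  rw [pvSegsB]
  rw [pvFirstBreak_eq_natFB, pvNatFB_cons2]
  by_cases hg : pvGap thr (a :: b :: t) 0 = true
  · rw [if_pos hg, if_pos hg]
    simp only [Option.map_some]
    rw [show ((0 : Nat) : Int) + 1 = (1 : Int) from by norm_num]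
    rw [PySem.List.slice_from_one]
    simp [PySem.List.pyGet?_zero_cons]
  · rw [if_neg hg, if_neg hg]
    cases hfb : pvNatFB thr (b :: t) with
    | none =>
      simp only [Option.map_none]
      rw [pvSegsB]
      rw [pvFirstBreak_eq_natFB, hfb]
      simp only [Option.map_none]
      rw [PySem.List.pyGet?_neg_one, PySem.List.pyGet?_neg_one]
      rw [List.getLast?_cons_cons]
      simp [pvUpdStart, PySem.List.pyGet?_zero_cons]
    | some j =>
      simp only [Option.map_some]
      conv_rhs => rw [pvSegsB]
      rw [pvFirstBreak_eq_natFB, hfb]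
      simp only [Option.map_some]
      have e1 : ((j + 1 : Nat) : Int) + 1 - 1 = ((j + 1 : Nat) : Int) := by ring
      have e2 : ((j : Nat) : Int) + 1 - 1 = ((j : Nat) : Int) := by ring
      rw [e1, e2]
      have hsl1 : PySem.List.slice (a :: b :: t) (some (((j + 1 : Nat) : Int) + 1)) none
          = (b :: t).drop (j + 1) := by
        rw [show ((j + 1 : Nat) : Int) + 1 = ((j + 2 : Nat) : Int) from by push_cast; ring]
        rw [PySem.List.slice_from _ (by positivity)]
        rw [Int.toNat_natCast]
        rw [show j + 2 = (j + 1) + 1 from rfl, List.drop_succ_cons]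
      have hsl2 : PySem.List.slice (b :: t) (some (((j : Nat) : Int) + 1)) none
          = (b :: t).drop (j + 1) := by
        rw [show ((j : Nat) : Int) + 1 = ((j + 1 : Nat) : Int) from by push_cast; ring]
        rw [PySem.List.slice_from _ (by positivity)]
        rw [Int.toNat_natCast]
      rw [hsl1, hsl2]
      have hget : (PySem.List.pyGet? (a :: b :: t) ((j + 1 : Nat) : Int)).getD 0
          = (PySem.List.pyGet? (b :: t) ((j : Nat) : Int)).getD 0 := by
        simp only [PySem.List.pyGet?_natCast]
        simp
      rw [hget]
      simp [pvUpdStart, PySem.List.pyGet?_zero_cons]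

lemma pvSegsB_cons_eq_segs (thr : Int) : ∀ (rest : List Int) (a : Int),
    pvSegsB thr (a :: rest) = pvSegs thr a a rest := by
  intro rest
  induction rest with
  | nil => intro a; rw [pvSegsB_singleton]; rfl
  | cons b t ih =>
    intro a
    rw [pvSegsB_cons2]
    have hgap : pvGap thr (a :: b :: t) 0 = decide (b ≠ a ∧ b - a > thr) := by
      unfold pvGap; simp
    by_cases hc : b ≠ a ∧ b - a > thr
    · rw [hgap, if_pos (by simpa using hc)]
      rw [ih b]
      rw [show pvSegs thr a a (b :: t) = [a, a] :: pvSegs thr b b t from by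
        simp [pvSegs, hc]]
    · rw [hgap, if_neg (by simpa using hc)]
      rw [ih b]
      rw [show pvSegs thr a a (b :: t) = pvSegs thr b a t from by
        simp only [pvSegs, if_neg hc]]
      rw [pvSegs_upd thr t b a]

-- ---- A side characterisation (unchanged from the straightforward reading of A's loop) ----
lemma pvSqueeze_eq (t : List Int) (s p : Int) (hh : t.head? = some s) (hl : t.getLast? = some p) :
    pvSqueeze t = [s, p] := by
  unfold pvSqueeze
  by_cases h1 : t.length = 1
  · obtain ⟨x, hx⟩ : ∃ x, t = [x] := by
      cases t with
      | nil => simp at h1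
      | cons y r =>
        cases r with
        | nil => exact ⟨y, rfl⟩
        | cons z r' => simp at h1
    subst hx
    simp only [List.head?_cons, Option.some_inj] at hh
    simp only [List.getLast?_singleton, Option.some_inj] at hl
    simp [PySem.List.pyGet?_neg_one, hh]
    omega
  · have hne : t ≠ [] := by intro h; rw [h] at hh; simp at hh
    simp only [h1, if_false]
    rw [PySem.List.pyGet?_neg_one, hl]
    rw [PySem.List.pyGet?_zero]
    rw [← List.head?_eq_getElem?, hh]
    rfl

lemma pvALoop_spec (thr narr : Int) : ∀ (rest : List (Int × Int)) (temp : List Int)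
    (splits : List (List Int)) (s p : Int),
    (∀ x ∈ rest, x.1 ≠ narr) → temp.head? = some s → temp.getLast? = some p →
    ((pvALoop thr narr rest (temp, splits)).2 ++ [(pvALoop thr narr rest (temp, splits)).1]).map pvSqueeze
      = splits.map pvSqueeze ++ pvSegs thr p s (rest.map (·.2)) := by
  intro rest
  induction rest with
  | nil =>
    intro temp splits s p _ hh hl
    simp [pvALoop, pvSegs, pvSqueeze_eq temp s p hh hl]
  | cons iv rest ih =>
    intro temp splits s p hidx hh hl
    obtain ⟨i, v⟩ := iv
    have hidx' : ∀ x ∈ rest, x.1 ≠ narr := fun x hx => hidx x (List.mem_cons_of_mem _ hx)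
    have hlast : (PySem.List.pyGet? temp (-1)).getD 0 = p := by
      rw [PySem.List.pyGet?_neg_one, hl]; rfl
    show ((pvALoop thr narr ((i, v) :: rest) (temp, splits)).2 ++ _).map pvSqueeze = _
    rw [show pvALoop thr narr ((i, v) :: rest) (temp, splits)
        = (if v = (PySem.List.pyGet? temp (-1)).getD 0 then pvALoop thr narr rest (temp, splits)
           else if v - (PySem.List.pyGet? temp (-1)).getD 0 ≤ thr then pvALoop thr narr rest (temp ++ [v], splits)
           else if ¬ i = narr then pvALoop thr narr rest ([v], splits ++ [temp])
           else pvALoop thr narr rest (temp, splits ++ [temp])) from rfl]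
    rw [hlast]
    by_cases hvp : v = p
    · rw [if_pos hvp]
      rw [ih temp splits s p hidx' hh hl]
      congr 1
      simp only [List.map_cons, pvSegs]
      rw [if_neg (by simp [hvp])]
      rw [hvp]
    · rw [if_neg hvp]
      by_cases hle : v - p ≤ thr
      · rw [if_pos hle]
        have hne : temp ≠ [] := by intro h; rw [h] at hh; simp at hh
        have hh' : (temp ++ [v]).head? = some s := by
          rw [List.head?_append_of_ne_nil _ hne]; exact hh
        have hl' : (temp ++ [v]).getLast? = some v := by simp
        rw [ih (temp ++ [v]) splits s v hidx' hh' hl']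
        congr 1
        simp only [List.map_cons, pvSegs]
        rw [if_neg (by rintro ⟨-, h⟩; omega)]
      · rw [if_neg hle]
        have hi : ¬ i = narr := hidx (i, v) List.mem_cons_self
        rw [if_pos hi]
        rw [ih [v] (splits ++ [temp]) v v hidx' rfl rfl]
        rw [List.map_append]
        simp only [List.map_cons, List.map_nil]
        rw [pvSqueeze_eq temp s p hh hl]
        rw [show pvSegs thr p s (v :: rest.map (·.2)) = [s, p] :: pvSegs thr v v (rest.map (·.2)) from by
          simp only [pvSegs]
          rw [if_pos ⟨hvp, by omega⟩]]
        simp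

lemma pvASegments_cons_eq_segs (thr : Int) (a : Int) (rest : List Int) :
    pvASegments thr (a :: rest) = pvSegs thr a a rest := by
  unfold pvASegments
  rw [PySem.List.enumerate_cons]
  have h0 : (PySem.List.pyGet? (a :: rest) 0).getD 0 = a := by
    rw [PySem.List.pyGet?_zero_cons]; rfl
  rw [h0]
  rw [show pvALoop thr (PySem.List.len (a :: rest)) ((0, a) :: PySem.List.enumerate rest (0 + 1)) ([a], [])
      = pvALoop thr (PySem.List.len (a :: rest)) (PySem.List.enumerate rest (0 + 1)) ([a], []) from by
    rw [show pvALoop thr (PySem.List.len (a :: rest)) ((0, a) :: PySem.List.enumerate rest (0 + 1)) ([a], [])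
        = (if a = (PySem.List.pyGet? [a] (-1)).getD 0 then
             pvALoop thr (PySem.List.len (a :: rest)) (PySem.List.enumerate rest (0 + 1)) ([a], [])
           else if a - (PySem.List.pyGet? [a] (-1)).getD 0 ≤ thr then _ else if ¬ (0 : Int) = _ then _ else _) from rfl]
    rw [if_pos (by rw [PySem.List.pyGet?_neg_one]; rfl)]]
  rw [pvALoop_spec thr (PySem.List.len (a :: rest)) (PySem.List.enumerate rest (0 + 1)) [a] [] a a
      ?_ rfl rfl]
  · rw [PySem.List.map_snd_enumerate]
    simp
  · intro x hx
    rw [PySem.List.mem_enumerate_iff] at hx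
    obtain ⟨k, hk, hxeq⟩ := hx
    rw [PySem.List.len_eq]
    subst hxeq
    simp only [List.length_cons]
    intro hcontra
    have : (0 : Int) + 1 + k = (rest.length : Int) + 1 := by exact_mod_cast hcontra
    omega

lemma pvSegments_agree (thr : Int) (arr : List Int) :
    pvASegments thr arr = pvSegsB thr arr := by
  cases arr with
  | nil =>
    rw [pvSegsB]
    rw [show pvFirstBreak thr [] = none from rfl]
    rfl
  | cons a rest =>
    rw [pvASegments_cons_eq_segs, pvSegsB_cons_eq_segs]

-- ===== VERDICT (by name: the statement is the Claim_ definition above) =====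
theorem split_show_time_spec : Claim_equal_split_show_time := by
  intro named_show thr _ _
  unfold Spec_split_show_time split_show_time split_show_time_alt
  rw [show (fun (out : List (String × List (List Int))) (p : String × List Int) =>
        let segs := pvSegsB thr p.2
        if pvKeepCondB segs then out ++ [(p.1, segs)] else out)
      = (fun out p => if (fun q : String × List Int => pvKeepCondB (pvSegsB thr q.2)) p
          then out ++ [(fun q : String × List Int => (q.1, pvSegsB thr q.2)) p] else out) from rfl]
  rw [PySem.List.foldl_append_if]
  rw [List.nil_append]
  rw [show (fun p : String × List Int => (p.1, pvASegments thr p.2))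
      = (fun p : String × List Int => (p.1, pvSegsB thr p.2)) from by
    funext p; rw [pvSegments_agree]]
  rw [List.filter_map]
  rfl
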